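-- pv_equiv track=rewrite | github.com/CristoJV/semordnilap | src/semordnilap/search_engine.py | decompositions_candidates
-- ===== SOURCE A (Python) =====
-- def decompositions_candidates(
--     norm_target: str,
--     norm_ngrams: set[str],
--     maximum_ngrams: int = 3,
-- ):
--     solutions: list[list[str]] = []
--     candidates: list[tuple[int, list[str]]] = [(0, [])]
--
--     while candidates:
--         i, phrase = candidates.pop()
--
--         if i == len(norm_target):
--             solutions.append(phrase)
--             continue
--
--         if len(phrase) >= maximum_ngrams:  # Prune
--             continue
--
--         for j in range(i + 1, len(norm_target) + 1):
--             frag = norm_target[i:j]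
--             if frag in norm_ngrams:
--                 candidates.append((j, phrase + [frag]))
--     return solutions
-- ===== SOURCE B (Python) =====
-- def decompositions_candidates(
--     norm_target: str,
--     norm_ngrams: set[str],
--     maximum_ngrams: int = 3,
-- ):
--     # Precompute, once per start index, the admissible next fragments
--     # (end position, fragment), with end positions descending, then
--     # enumerate decompositions by a recursive DFS over that table.
--     n = len(norm_target)
--     nexts: list[list[tuple[int, str]]] = []
--     for i in range(n):
--         row = []
--         for j in range(n, i, -1):
--             frag = norm_target[i:j]
--             if frag in norm_ngrams:
--                 row.append((j, frag))
--         nexts.append(row)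
--
--     def rec(i: int, k: int) -> list[list[str]]:
--         if i == n:
--             return [[]]
--         if k <= 0:
--             return []
--         return [[frag] + rest for (j, frag) in nexts[i] for rest in rec(j, k - 1)]
--
--     return rec(0, maximum_ngrams)
-- ===== Notes on version B (the rewrite author's own statement) =====
-- stated objective: alternative
-- what changed: replaces A's explicit LIFO work-stack loop that re-slices substrings at every node by a one-time precomputed table of admissible next fragments per start index plus a recursive DFS over that table
import Mathlib
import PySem

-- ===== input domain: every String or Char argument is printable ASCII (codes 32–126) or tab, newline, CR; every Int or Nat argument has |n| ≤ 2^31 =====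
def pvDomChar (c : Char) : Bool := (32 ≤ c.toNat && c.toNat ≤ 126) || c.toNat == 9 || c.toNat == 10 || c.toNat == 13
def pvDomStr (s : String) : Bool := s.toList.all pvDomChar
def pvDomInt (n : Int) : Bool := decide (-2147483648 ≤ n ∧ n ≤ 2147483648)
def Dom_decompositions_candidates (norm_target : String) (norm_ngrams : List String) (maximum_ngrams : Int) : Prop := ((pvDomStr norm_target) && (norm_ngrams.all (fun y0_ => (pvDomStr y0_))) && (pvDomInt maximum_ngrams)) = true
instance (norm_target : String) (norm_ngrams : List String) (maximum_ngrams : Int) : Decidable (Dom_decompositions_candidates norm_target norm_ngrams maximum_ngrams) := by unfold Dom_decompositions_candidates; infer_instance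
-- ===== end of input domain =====

-- B replaces A's explicit LIFO work-stack loop (which re-slices substrings at every node) by a
-- one-time table of admissible next fragments per start index plus a recursive DFS over that
-- table; objective: alternative algorithm, same results in the same order.

-- ===== PORT A =====
-- exact port of norm_target[i:j] for natural 0 ≤ i ≤ j (the only way both programs slice)
def pvSlice (t : List Char) (i j : Nat) : String := String.ofList ((t.drop i).take (j - i))

-- the entries A's inner `for j in range(i+1, len+1)` loop appends (list head = stack top,
-- so the ascending-j appends become this reversed list prepended to the stack)
def pvPushA (t : List Char) (ng : List String) (i : Nat) (phrase : List String) :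
    List (Nat × List String) :=
  (((List.range' (i+1) (t.length - i)).filter (fun j => ng.contains (pvSlice t i j))).reverse).map
    (fun j => (j, phrase ++ [pvSlice t i j]))

-- termination measure for A's while-loop: potential of a stack entry and of the stack
def pvPot (n i : Nat) : Nat := (n+1)^(n+1-i)
def pvMeas (n : Nat) (st : List (Nat × List String)) : Nat :=
  (st.map (fun e => pvPot n e.1)).sum

theorem pvSum_pot_lt (n i : Nat) (js : List Nat) (h : ∀ j ∈ js, i + 1 ≤ j)
    (hlen : js.length ≤ n - i) : (js.map (pvPot n)).sum < pvPot n i := by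
  have hbound : ∀ x ∈ js.map (pvPot n), x ≤ (n+1)^(n-i) := by
    intro x hx
    rcases List.mem_map.1 hx with ⟨j, hj, rfl⟩
    exact Nat.pow_le_pow_right (Nat.succ_le_succ (Nat.zero_le n)) (by have := h j hj; omega)
  have hsum := List.sum_le_card_nsmul _ _ hbound
  simp only [List.length_map, smul_eq_mul] at hsum
  have h1 : js.length * (n+1)^(n-i) ≤ (n - i) * (n+1)^(n-i) :=
    Nat.mul_le_mul_right _ hlen
  rcases Nat.lt_or_ge n i with hlt | hle
  swap
  · have h2 : (n - i) * (n+1)^(n-i) < (n+1) * (n+1)^(n-i) := by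
      exact (Nat.mul_lt_mul_right (Nat.pow_pos (n := n - i) (show 0 < n + 1 by omega))).2 (by omega)
    have h3 : (n+1) * (n+1)^(n-i) = pvPot n i := by
      unfold pvPot
      have hni : n + 1 - i = (n - i) + 1 := by omega
      rw [hni, pow_succ]; ring
    omega
  · have hz : js = [] := by
      have : js.length = 0 := by omega
      exact List.eq_nil_of_length_eq_zero this
    subst hz
    have := Nat.pow_pos (n := n + 1 - i) (show 0 < n + 1 from Nat.succ_pos n)
    simpa [pvPot] using this

theorem pvMeas_push_lt (t : List Char) (ng : List String) (i : Nat) (phrase : List String)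
    (rest : List (Nat × List String)) :
    pvMeas t.length (pvPushA t ng i phrase ++ rest) < pvMeas t.length ((i, phrase) :: rest) := by
  unfold pvMeas pvPushA
  simp only [List.map_append, List.sum_append, List.map_map, List.map_cons, List.sum_cons]
  have : ((((List.range' (i+1) (t.length - i)).filter
        (fun j => ng.contains (pvSlice t i j))).reverse).map
        ((fun e => pvPot t.length e.1) ∘ fun j => (j, phrase ++ [pvSlice t i j]))).sum
      < pvPot t.length i := by
    have hmap : (((List.range' (i+1) (t.length - i)).filter
        (fun j => ng.contains (pvSlice t i j))).reverse).map
        ((fun e => pvPot t.length e.1) ∘ fun j => (j, phrase ++ [pvSlice t i j]))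
        = (((List.range' (i+1) (t.length - i)).filter
        (fun j => ng.contains (pvSlice t i j))).reverse).map (pvPot t.length) := by
      simp [Function.comp]
    rw [hmap]
    apply pvSum_pot_lt
    · intro j hj
      have := List.mem_range'_1.1 (List.mem_of_mem_filter (List.mem_reverse.1 hj))
      omega
    · rw [List.length_reverse]
      have hf := List.length_filter_le
        (fun j => ng.contains (pvSlice t i j)) (List.range' (i+1) (t.length - i))
      simp only [List.length_range'] at hf
      exact hf
  omega

-- A's while-loop, stack head = top (python pop() / append at the end)
def pvLoopA (t : List Char) (ng : List String) (mx : Int) :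
    List (List String) → List (Nat × List String) → List (List String)
  | sols, [] => sols
  | sols, (i, phrase) :: rest =>
    if i = t.length then pvLoopA t ng mx (sols ++ [phrase]) rest
    else if mx ≤ (phrase.length : Int) then pvLoopA t ng mx sols rest
    else pvLoopA t ng mx sols (pvPushA t ng i phrase ++ rest)
  termination_by _ st => pvMeas t.length st
  decreasing_by
    · unfold pvMeas; simp [pvPot]
    · unfold pvMeas; simp [pvPot]
    · exact pvMeas_push_lt t ng i phrase rest

def decompositions_candidates (norm_target : String) (norm_ngrams : List String)
    (maximum_ngrams : Int) : List (List String) :=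
  pvLoopA norm_target.toList norm_ngrams maximum_ngrams [] [(0, [])]

-- ===== PORT B =====
-- nexts[i]: the (end position, fragment) pairs of Source B's `for j in range(n, i, -1)` loop
def pvRow (t : List Char) (ng : List String) (i : Nat) : List (Nat × String) :=
  ((List.range' (i+1) (t.length - i)).reverse).filterMap
    (fun j => if ng.contains (pvSlice t i j) then some (j, pvSlice t i j) else none)

def pvNexts (t : List Char) (ng : List String) : List (List (Nat × String)) :=
  (List.range t.length).map (pvRow t ng)

-- Source B's rec(i, k); fuel (≥ n - i at every call) only makes the recursion total
def pvRecB (t : List Char) (ng : List String) : Nat → Nat → Int → List (List String)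
  | fuel, i, k =>
    if i = t.length then [[]]
    else if k ≤ 0 then []
    else match fuel with
      | 0 => []
      | fuel+1 =>
        (((pvNexts t ng).getD i []).map
          (fun e => (pvRecB t ng fuel e.1 (k-1)).map (fun rest => e.2 :: rest))).flatten

def decompositions_candidates_alt (norm_target : String) (norm_ngrams : List String)
    (maximum_ngrams : Int) : List (List String) :=
  pvRecB norm_target.toList norm_ngrams norm_target.toList.length 0 maximum_ngrams

-- ===== PRECONDITION & SPEC =====
def Spec_decompositions_candidates (norm_target : String) (norm_ngrams : List String) (maximum_ngrams : Int) (out : List (List String)) : Prop := out = decompositions_candidates_alt norm_target norm_ngrams maximum_ngrams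
instance (norm_target : String) (norm_ngrams : List String) (maximum_ngrams : Int) (out : List (List String)) : Decidable (Spec_decompositions_candidates norm_target norm_ngrams maximum_ngrams out) := by unfold Spec_decompositions_candidates; infer_instance

-- ===== CLAIM (what is proved, stated in full; the proofs are below) =====
def Claim_equal_decompositions_candidates : Prop := ∀ (norm_target : String) (norm_ngrams : List String) (maximum_ngrams : Int), Dom_decompositions_candidates norm_target norm_ngrams maximum_ngrams → Spec_decompositions_candidates norm_target norm_ngrams maximum_ngrams (decompositions_candidates norm_target norm_ngrams maximum_ngrams)

-- ===== LEMMAS AND PROOFS =====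

-- the solutions contributed by a single stack entry of A's loop, in emission order
def pvG (t : List Char) (ng : List String) (mx : Int) (i : Nat) (phrase : List String) :
    List (List String) :=
  if i = t.length then [phrase]
  else if mx ≤ (phrase.length : Int) then []
  else ((pvPushA t ng i phrase).attach.map (fun e => pvG t ng mx e.1.1 e.1.2)).flatten
  termination_by t.length - i
  decreasing_by
    rcases e with ⟨⟨j, ph⟩, hmem⟩
    simp only [pvPushA, List.mem_map, List.mem_reverse] at hmem
    rcases hmem with ⟨j', hj', hEq⟩
    have hr := List.mem_range'_1.1 (List.mem_of_mem_filter hj')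
    have hjj : j' = j := by simpa using congrArg Prod.fst hEq
    subst hjj
    simp only
    omega

theorem pvLoopA_eq (t : List Char) (ng : List String) (mx : Int) (sols : List (List String))
    (st : List (Nat × List String)) :
    pvLoopA t ng mx sols st = sols ++ (st.map (fun e => pvG t ng mx e.1 e.2)).flatten := by
  fun_induction pvLoopA t ng mx sols st
  case case1 => simp
  case case2 sols phrase rest ih =>
    rw [ih]
    simp only [List.map_cons, List.flatten_cons]
    rw [pvG.eq_def]
    simp
  case case3 sols i phrase rest hi hp ih =>
    rw [ih]
    simp only [List.map_cons, List.flatten_cons]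
    rw [pvG.eq_def]
    simp [hi, hp]
  case case4 sols i phrase rest hi hp ih =>
    rw [ih]
    simp only [List.map_cons, List.flatten_cons, List.map_append, List.flatten_append]
    conv_rhs => rw [pvG.eq_def]
    simp only [if_neg hi, if_neg hp]
    simp [List.map_attach_eq_pmap, List.pmap_eq_map]

theorem pvFilterMap_if {α : Type} (l : List Nat) (p : Nat → Bool) (h : Nat → α) :
    l.filterMap (fun j => if p j then some (h j) else none) = (l.filter p).map h := by
  induction l with
  | nil => simp
  | cons x xs ih => by_cases hp : p x <;> simp [hp, ih]

theorem pvNexts_getD (t : List Char) (ng : List String) (i : Nat) (hi : i < t.length) :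
    (pvNexts t ng).getD i [] = pvRow t ng i := by
  unfold pvNexts
  rw [List.getD_eq_getElem?_getD]
  simp [hi]

theorem pvRow_eq (t : List Char) (ng : List String) (i : Nat) :
    pvRow t ng i
      = (((List.range' (i+1) (t.length - i)).filter
          (fun j => ng.contains (pvSlice t i j))).reverse).map
          (fun j => (j, pvSlice t i j)) := by
  unfold pvRow
  rw [pvFilterMap_if]
  rw [List.filter_reverse]

theorem pvG_eq_rec (t : List Char) (ng : List String) (mx : Int) :
    ∀ (fuel i : Nat) (phrase : List String), i ≤ t.length → t.length - i ≤ fuel →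
    pvG t ng mx i phrase
      = (pvRecB t ng fuel i (mx - phrase.length)).map (fun r => phrase ++ r) := by
  intro fuel
  induction fuel with
  | zero =>
    intro i phrase h1 h2
    have hin : i = t.length := by omega
    subst hin
    rw [pvG.eq_def, pvRecB]
    simp
  | succ fuel ih =>
    intro i phrase h1 h2
    by_cases hi : i = t.length
    · subst hi
      rw [pvG.eq_def, pvRecB]
      simp
    · have hilt : i < t.length := by omega
      by_cases hp : mx ≤ (phrase.length : Int)
      · have hk : mx - (phrase.length : Int) ≤ 0 := by omega
        rw [pvG.eq_def, pvRecB]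
        simp [hi, hp, hk]
      · have hk : ¬ (mx - (phrase.length : Int) ≤ 0) := by omega
        rw [pvG.eq_def, pvRecB]
        simp only [if_neg hi, if_neg hp, if_neg hk]
        rw [pvNexts_getD t ng i hilt, pvRow_eq]
        simp only [List.map_attach_eq_pmap, List.pmap_eq_map, pvPushA, List.map_map,
          List.map_flatten]
        congr 1
        apply List.map_congr_left
        intro j hj
        have hjb := List.mem_range'_1.1 (List.mem_of_mem_filter (List.mem_reverse.1 hj))
        have hjle : j ≤ t.length := by omega
        have hjf : t.length - j ≤ fuel := by omega
        simp only [Function.comp]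
        rw [ih j (phrase ++ [pvSlice t i j]) hjle hjf]
        have hlen : (mx - ((phrase ++ [pvSlice t i j]).length : Int))
            = mx - (phrase.length : Int) - 1 := by
          simp
          ring
        rw [hlen]
        simp [List.map_map, Function.comp, List.append_assoc]

theorem decompositions_candidates_spec_aux (norm_target : String) (norm_ngrams : List String)
    (maximum_ngrams : Int) :
    decompositions_candidates norm_target norm_ngrams maximum_ngrams
      = decompositions_candidates_alt norm_target norm_ngrams maximum_ngrams := by
  unfold decompositions_candidates decompositions_candidates_alt
  rw [pvLoopA_eq]
  simp only [List.map_cons, List.map_nil, List.flatten_cons, List.flatten_nil,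
    List.nil_append, List.append_nil]
  rw [pvG_eq_rec norm_target.toList norm_ngrams maximum_ngrams norm_target.toList.length 0 []
    (Nat.zero_le _) (by omega)]
  simp

-- ===== VERDICT (by name: the statement is the Claim_ definition above) =====
theorem decompositions_candidates_spec : Claim_equal_decompositions_candidates := by
  intro nt ng mx _dom
  unfold Spec_decompositions_candidates
  exact decompositions_candidates_spec_aux nt ng mx
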